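-- pv_equiv track=rewrite | github.com/Julia20025566/hopfild_cosco | cosco.py | print_images
-- ===== SOURCE A (Python) =====
-- def print_images(img1, img2, dic, n):
--     a1 = ''
--     a2 = ''
--     c = ''
--     d = ''
--     for i in range(len(img1) + 1):
--
--         if i % n == 0:
--             c += a1 + '\n'
--             d += a2 + '\n'
--             a1 = ''
--             a2 = ''
--         if i != len(img1):
--             a1 += dic[img1[i]]
--             a2 += dic[img2[i]]
--
--     c += "\n" + d
--     return c
-- ===== SOURCE B (Python) =====
-- def print_images(img1, img2, dic, n):
--     m = len(img1) // n  # division first, like the row arithmetic requires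
--     t1 = []
--     t2 = []
--     for i in range(len(img1)):
--         t1.append(dic[img1[i]])
--         t2.append(dic[img2[i]])
--     c = '\n' + ''.join(''.join(t1[j * n:(j + 1) * n]) + '\n' for j in range(m))
--     d = '\n' + ''.join(''.join(t2[j * n:(j + 1) * n]) + '\n' for j in range(m))
--     return c + '\n' + d
-- ===== Notes on version B (the rewrite author's own statement) =====
-- stated objective: alternative
-- what changed: A builds both grids in one interleaved loop that accumulates a row and flushes it at each index divisible by n; B first does a translation pass producing the two lists of cell strings, computes the number m of complete rows by one division, and then assembles each grid by slicing and joining n-sized chunks.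
-- outside the precondition, e.g. on print_images([1, 1], [1, 1], {1: '#'}, -2): A returns '\n##\n\n\n##\n', B returns '\n\n\n'
import Mathlib
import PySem

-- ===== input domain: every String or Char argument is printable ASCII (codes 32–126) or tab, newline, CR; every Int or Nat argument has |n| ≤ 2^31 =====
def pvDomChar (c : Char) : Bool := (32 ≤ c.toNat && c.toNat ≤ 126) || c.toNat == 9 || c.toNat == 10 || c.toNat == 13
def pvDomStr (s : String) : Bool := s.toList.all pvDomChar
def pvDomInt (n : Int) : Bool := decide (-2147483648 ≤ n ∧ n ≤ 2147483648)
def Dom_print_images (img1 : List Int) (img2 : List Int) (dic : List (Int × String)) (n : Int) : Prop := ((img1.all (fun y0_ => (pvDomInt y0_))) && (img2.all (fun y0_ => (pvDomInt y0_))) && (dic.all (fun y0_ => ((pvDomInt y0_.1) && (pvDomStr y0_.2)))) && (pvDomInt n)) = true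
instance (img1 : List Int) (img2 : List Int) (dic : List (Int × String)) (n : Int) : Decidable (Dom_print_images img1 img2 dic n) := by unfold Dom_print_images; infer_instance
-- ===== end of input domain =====

-- B replaces A's single interleaved accumulate-and-flush loop by a translation pass followed by
-- a chunking pass (slice the cell list into len//n complete rows and join them); no argument is mutated.

-- ===== PORT A =====
-- one loop iteration of A for one image (A's body runs this on (a1,c) with img1 and on (a2,d) with img2)
def printStep (img : List Int) (dic : List (Int × String)) (n : Int) (len : Int)
    (s : List Char × List Char) (i : Int) : List Char × List Char :=
  let s := if PySem.Int.mod i n == 0 then (([] : List Char), s.2 ++ s.1 ++ ['\n']) else s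
  if i != len then
    (s.1 ++ ((PySem.Dict.get? (PySem.Dict.mk dic) ((PySem.List.pyGet? img i).getD 0)).getD "").toList, s.2)
  else s

def print_images (img1 : List Int) (img2 : List Int) (dic : List (Int × String)) (n : Int) : String :=
  let len : Int := (img1.length : Int)
  let st := (PySem.List.pyRange 0 (len + 1) 1).foldl
    (fun s i => (printStep img1 dic n len s.1 i, printStep img2 dic n len s.2 i))
    ((([] : List Char), ([] : List Char)), (([] : List Char), ([] : List Char)))
  String.ofList (st.1.2 ++ '\n' :: st.2.2)

-- ===== PORT B =====
def print_images_alt (img1 : List Int) (img2 : List Int) (dic : List (Int × String)) (n : Int) : String :=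
  let m : Int := PySem.Int.floordiv (img1.length : Int) n
  -- translation pass: t1, t2 collect the cell strings in A's per-index order
  let ts := (PySem.List.pyRange 0 (img1.length : Int) 1).foldl
    (fun (p : List (List Char) × List (List Char)) i =>
      (p.1 ++ [((PySem.Dict.get? (PySem.Dict.mk dic) ((PySem.List.pyGet? img1 i).getD 0)).getD "").toList],
       p.2 ++ [((PySem.Dict.get? (PySem.Dict.mk dic) ((PySem.List.pyGet? img2 i).getD 0)).getD "").toList]))
    (([], []))
  -- chunking pass: m complete rows, each a slice of n cells, '\n'-terminated
  let c := '\n' :: ((PySem.List.pyRange 0 m 1).map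
      (fun j => (PySem.List.slice ts.1 (some (j * n)) (some ((j + 1) * n))).flatten ++ ['\n'])).flatten
  let d := '\n' :: ((PySem.List.pyRange 0 m 1).map
      (fun j => (PySem.List.slice ts.2 (some (j * n)) (some ((j + 1) * n))).flatten ++ ['\n'])).flatten
  String.ofList (c ++ '\n' :: d)

-- ===== PRECONDITION & SPEC =====
-- Pre_ excludes n = 0 (A raises ZeroDivisionError), inputs whose lookups raise (a value of img1,
-- or of img2 at an index below len(img1), missing from dic, or img2 shorter than img1), and
-- negative n of magnitude ≤ len(img1): there A's flush-at-multiples-of-|n| layout and B's empty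
-- grid are both accidental readings of a nonsensical row width outside the natural domain, and
-- neither is specified (negative n of larger magnitude stays admitted: both return bare newlines).
def Pre_print_images (img1 : List Int) (img2 : List Int) (dic : List (Int × String)) (n : Int) : Prop :=
  (1 ≤ n ∨ (img1.length : Int) < -n) ∧ img1.length ≤ img2.length ∧
  (∀ x ∈ img1, (PySem.Dict.get? (PySem.Dict.mk dic) x).isSome = true) ∧
  (∀ x ∈ img2.take img1.length, (PySem.Dict.get? (PySem.Dict.mk dic) x).isSome = true)
instance (img1 : List Int) (img2 : List Int) (dic : List (Int × String)) (n : Int) : Decidable (Pre_print_images img1 img2 dic n) := by unfold Pre_print_images; infer_instance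

def pvWitness_print_images : List Int × List Int × (List (Int × String)) × Int :=
  ([0, 1, 1], [1, 0, 1], [(0, "."), (1, "#")], 2)

def Spec_print_images (img1 : List Int) (img2 : List Int) (dic : List (Int × String)) (n : Int) (out : String) : Prop := out = print_images_alt img1 img2 dic n
instance (img1 : List Int) (img2 : List Int) (dic : List (Int × String)) (n : Int) (out : String) : Decidable (Spec_print_images img1 img2 dic n out) := by unfold Spec_print_images; infer_instance

-- ===== CLAIM (what is proved, stated in full; the proofs are below) =====
def Claim_equal_print_images : Prop := ∀ (img1 : List Int) (img2 : List Int) (dic : List (Int × String)) (n : Int), Dom_print_images img1 img2 dic n → Pre_print_images img1 img2 dic n → Spec_print_images img1 img2 dic n (print_images img1 img2 dic n)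

-- ===== LEMMAS AND PROOFS =====

-- the cell string of index i (the Nat-index view of both ports' lookup)
def pvCell (img : List Int) (dic : List (Int × String)) (i : Nat) : List Char :=
  ((PySem.Dict.get? (PySem.Dict.mk dic) ((img[i]?).getD 0)).getD "").toList

-- the Nat-index view of printStep
def pvStep (u : Nat → List Char) (L n' : Nat) (s : List Char × List Char) (i : Nat) :
    List Char × List Char :=
  if i != L then
    ((if i % n' == 0 then ([] : List Char) else s.1) ++ u i,
     if i % n' == 0 then s.2 ++ s.1 ++ ['\n'] else s.2)
  else
    ((if i % n' == 0 then ([] : List Char) else s.1),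
     if i % n' == 0 then s.2 ++ s.1 ++ ['\n'] else s.2)

-- the first q complete rows: each row is n' consecutive cells plus a newline
def pvRows (u : Nat → List Char) (n' q : Nat) : List Char :=
  ((List.range q).map (fun j => ((List.range' (j * n') n').map u).flatten ++ ['\n'])).flatten

theorem pvStep_cast (img : List Int) (dic : List (Int × String)) (n' L : Nat)
    (s : List Char × List Char) (i : Nat) :
    printStep img dic (n' : Int) (L : Int) s (i : Nat) = pvStep (pvCell img dic) L n' s i := by
  simp only [printStep, pvStep, pvCell, PySem.Int.mod_natCast, PySem.List.pyGet?_natCast,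
    Nat.cast_inj, Nat.cast_eq_zero, beq_iff_eq, bne_iff_ne, ne_eq]
  by_cases h2 : i = L
  · subst h2
    by_cases h1 : i % n' = 0 <;> simp [h1]
  · by_cases h1 : i % n' = 0 <;> simp [h1, h2]

theorem pvRows_succ (u : Nat → List Char) (n' q : Nat) :
    pvRows u n' (q + 1) = pvRows u n' q ++ (((List.range' (q * n') n').map u).flatten ++ ['\n']) := by
  simp [pvRows, List.range_succ]

theorem pv_div_pred_of_dvd (n m : Nat) (hn : 1 ≤ n) (hm : 1 ≤ m) : (n * m - 1) / n = m - 1 := by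
  obtain ⟨m', rfl⟩ : ∃ m', m = m' + 1 := ⟨m - 1, by omega⟩
  have h : n * (m' + 1) - 1 = (n - 1) + m' * n := by
    have := Nat.mul_le_mul_left n hm; ring_nf; omega
  rw [h, Nat.add_mul_div_right _ _ (by omega), Nat.div_eq_of_lt (by omega)]; omega

theorem pv_div_pred_of_not_dvd (n k : Nat) (hn : 1 ≤ n) (hk : 1 ≤ k) (h : k % n ≠ 0) :
    (k - 1) / n = k / n := by
  have hd := Nat.div_add_mod k n
  have hm := Nat.mod_lt k (show 0 < n by omega)
  have hc : n * (k / n) = (k / n) * n := Nat.mul_comm _ _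
  have h1 : k - 1 = (k % n - 1) + (k / n) * n := by omega
  rw [h1, Nat.add_mul_div_right _ _ (show 0 < n by omega), Nat.div_eq_of_lt (by omega)]; omega

-- loop invariant for A's accumulate-and-flush loop (after k iterations, 1 ≤ k ≤ L):
-- the row accumulator holds the cells since the last flush, the output holds the flushed rows
theorem pv_inv (u : Nat → List Char) (L n' : Nat) (hn : 1 ≤ n') (k : Nat) (h1 : 1 ≤ k)
    (hk : k ≤ L) :
    (List.range k).foldl (pvStep u L n') ([], []) =
      (((List.range' (n' * ((k - 1) / n')) (k - n' * ((k - 1) / n'))).map u).flatten,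
        '\n' :: pvRows u n' ((k - 1) / n')) := by
  induction k with
  | zero => omega
  | succ k ih =>
    rcases Nat.eq_zero_or_pos k with hk0 | hk1
    · subst hk0
      have hL : 0 ≠ L := by omega
      simp [pvStep, hL, pvRows, List.range'_one]
    · have hkL : (k != L) = true := by simp; omega
      rw [List.range_succ, List.foldl_append, ih hk1 (by omega)]
      by_cases hkn : k % n' = 0
      · obtain ⟨m, rfl⟩ : ∃ m, k = n' * m :=
          ⟨k / n', by have := Nat.div_add_mod k n'; omega⟩
        have hm1 : 1 ≤ m := by
          rcases Nat.eq_zero_or_pos m with h | h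
          · subst h; omega
          · exact h
        have hdiv : (n' * m - 1) / n' = m - 1 := pv_div_pred_of_dvd n' m hn hm1
        have hdiv2 : (n' * m + 1 - 1) / n' = m := by
          simp [Nat.mul_div_cancel_left m (show 0 < n' by omega)]
        simp only [List.foldl_cons, List.foldl_nil, pvStep, hkn, hdiv, hdiv2, hkL,
          beq_self_eq_true, if_pos]
        have hsub : n' * m - n' * (m - 1) = n' := by
          cases m with
          | zero => omega
          | succ m' => simp [Nat.mul_succ]
        rw [Prod.mk.injEq]
        constructor
        · simp [show n' * m + 1 - n' * m = 1 by omega, List.range'_one]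
        · rw [show m = (m - 1) + 1 by omega, pvRows_succ]
          simp [Nat.mul_comm, List.append_assoc]
          rw [show n' * (m - 1 + 1) - n' * (m - 1) = n' by
            rw [show m - 1 + 1 = m by omega]; exact hsub]
      · have hdiv : (k + 1 - 1) / n' = (k - 1) / n' := by
          simp only [Nat.add_sub_cancel]
          exact (pv_div_pred_of_not_dvd n' k hn hk1 hkn).symm
        have hp : n' * ((k - 1) / n') ≤ k := by
          have := Nat.div_mul_le_self (k - 1) n'
          have hc : n' * ((k - 1) / n') = ((k - 1) / n') * n' := Nat.mul_comm _ _
          omega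
        have hbeq : (k % n' == 0) = false := by simp [hkn]
        simp only [List.foldl_cons, List.foldl_nil, pvStep, hbeq, Bool.false_eq_true, if_false,
          hkL, if_true, hdiv]
        rw [Prod.mk.injEq]
        constructor
        · rw [show k + 1 - n' * ((k - 1) / n') = (k - n' * ((k - 1) / n')) + 1 by omega,
            List.range'_concat]
          simp [show n' * ((k - 1) / n') + (k - n' * ((k - 1) / n')) = k by omega]
        · rfl

-- after the full loop (including the final flush-only iteration i = L),
-- the output part is the newline plus the L / n' complete rows
theorem pv_final (u : Nat → List Char) (L n' : Nat) (hn : 1 ≤ n') :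
    ((List.range (L + 1)).foldl (pvStep u L n') ([], [])).2 = '\n' :: pvRows u n' (L / n') := by
  rcases Nat.eq_zero_or_pos L with hL0 | hL1
  · subst hL0; simp [pvStep, pvRows]
  · rw [List.range_succ, List.foldl_append, pv_inv u L n' hn L hL1 (le_refl L)]
    have hLL : (L != L) = false := by simp
    by_cases hkn : L % n' = 0
    · obtain ⟨m, rfl⟩ : ∃ m, L = n' * m :=
        ⟨L / n', by have := Nat.div_add_mod L n'; omega⟩
      have hm1 : 1 ≤ m := by
        rcases Nat.eq_zero_or_pos m with h | h
        · subst h; omega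
        · exact h
      have hdiv : (n' * m - 1) / n' = m - 1 := pv_div_pred_of_dvd n' m hn hm1
      have hdiv2 : n' * m / n' = m := Nat.mul_div_cancel_left m (by omega)
      have hsub : n' * m - n' * (m - 1) = n' := by
        cases m with
        | zero => omega
        | succ m' => simp [Nat.mul_succ]
      simp only [List.foldl_cons, List.foldl_nil, pvStep, hkn, hdiv, hdiv2, hLL,
        beq_self_eq_true, if_pos, Bool.false_eq_true, if_false]
      rw [show m = (m - 1) + 1 by omega, pvRows_succ]
      simp [Nat.mul_comm, List.append_assoc]
      rw [show n' * (m - 1 + 1) - n' * (m - 1) = n' by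
        rw [show m - 1 + 1 = m by omega]; exact hsub]
    · have hdiv : (L - 1) / n' = L / n' := pv_div_pred_of_not_dvd n' L hn hL1 hkn
      have hbeq : (L % n' == 0) = false := by simp [hkn]
      simp only [List.foldl_cons, List.foldl_nil, pvStep, hbeq, hLL, Bool.false_eq_true,
        if_false, hdiv]

theorem pv_take_range' (s n m : Nat) (h : m ≤ n) :
    (List.range' s n).take m = List.range' s m := by
  apply List.ext_getElem (by simp [h])
  intro i h1 h2
  simp [List.getElem_range']

theorem pv_chunk (u : Nat → List Char) (L a m : Nat) (h : a + m ≤ L) :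
    (((List.range L).map u).drop a).take m = (List.range' a m).map u := by
  rw [← List.map_drop, ← List.map_take, List.range_eq_range', List.drop_range']
  congr 1
  simp
  rw [pv_take_range' _ _ _ (by omega)]

-- B's chunking pass produces exactly the flushed rows
theorem pv_alt_rows (u : Nat → List Char) (L n' : Nat) (hn : 1 ≤ n') :
    ((PySem.List.pyRange 0 ((L / n' : Nat) : Int) 1).map
        (fun j => (PySem.List.slice ((List.range L).map u) (some (j * (n' : Int)))
            (some ((j + 1) * (n' : Int)))).flatten ++ ['\n'])).flatten
      = pvRows u n' (L / n') := by
  rw [PySem.List.pyRange_zero_natCast, List.map_map]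
  unfold pvRows
  congr 1
  apply List.map_congr_left
  intro j hj
  have hjq : j + 1 ≤ L / n' := List.mem_range.mp hj
  have hj' : (j + 1) * n' ≤ L :=
    le_trans (Nat.mul_le_mul_right _ hjq) (Nat.div_mul_le_self L n')
  have hcast : ((j : Nat) : Int) * (n' : Int) = ((j * n' : Nat) : Int) := by push_cast; ring
  have hcast2 : (((j : Nat) : Int) + 1) * (n' : Int) = ((j * n' : Nat) : Int) + (n' : Int) := by
    push_cast; ring
  simp only [Function.comp_apply, hcast, hcast2, PySem.List.slice_natCast_add]
  rw [pv_chunk u L (j * n') n' (by rw [show j * n' + n' = (j + 1) * n' by ring]; exact hj')]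


-- for negative n of magnitude above len(img1), no index past 0 flushes and no row completes
theorem pv_step_snd_noflush (img : List Int) (dic : List (Int × String)) (n len : Int)
    (s : List Char × List Char) (i : Int) (h : PySem.Int.mod i n ≠ 0) :
    (printStep img dic n len s i).2 = s.2 := by
  simp only [printStep, beq_iff_eq, h, if_false]
  by_cases h2 : i = len <;> simp [h2]

theorem pv_noflush (img1 img2 : List Int) (dic : List (Int × String)) (n len : Int)
    (l : List Int) (h : ∀ i ∈ l, PySem.Int.mod i n ≠ 0)
    (s : (List Char × List Char) × (List Char × List Char)) :
    ((l.foldl (fun s i => (printStep img1 dic n len s.1 i, printStep img2 dic n len s.2 i)) s).1.2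
        = s.1.2) ∧
    ((l.foldl (fun s i => (printStep img1 dic n len s.1 i, printStep img2 dic n len s.2 i)) s).2.2
        = s.2.2) := by
  induction l generalizing s with
  | nil => exact ⟨rfl, rfl⟩
  | cons a t ih =>
    simp only [List.foldl_cons]
    obtain ⟨ih1, ih2⟩ := ih (fun i hi => h i (List.mem_cons_of_mem a hi)) _
    rw [ih1, ih2]
    constructor
    · exact pv_step_snd_noflush img1 dic n len s.1 a (h a (List.mem_cons_self))
    · exact pv_step_snd_noflush img2 dic n len s.2 a (h a (List.mem_cons_self))

theorem pv_mod_ne_zero (n i : Int) (h1 : 1 ≤ i) (h2 : i < -n) : PySem.Int.mod i n ≠ 0 := by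
  intro h
  have hd' : -n ∣ i := (Int.neg_dvd).mpr ((PySem.Int.mod_eq_zero_iff_dvd i n).mp h)
  have := Int.le_of_dvd (by omega) hd'
  omega

theorem pv_floordiv_nonpos (L : Nat) (n : Int) (hn : n ≤ -1) :
    PySem.Int.floordiv (L : Int) n ≤ 0 := by
  have h1 := PySem.Int.floordiv_mul_add_mod (L : Int) n
  have h2 := PySem.Int.mod_neg_bounds (L : Int) (show n < 0 by omega)
  by_contra hq
  push Not at hq
  have : PySem.Int.floordiv (L : Int) n * n ≤ 1 * n :=
    mul_le_mul_of_nonpos_right (by omega) (by omega)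
  have hL : (0 : Int) ≤ (L : Int) := Int.natCast_nonneg L
  omega

theorem pv_range_neg_nil (L : Nat) (n : Int) (hn : n ≤ -1) :
    PySem.List.pyRange 0 (PySem.Int.floordiv (L : Int) n) = [] := by
  have := pv_floordiv_nonpos L n hn
  apply List.eq_nil_iff_forall_not_mem.mpr
  intro x hx
  have := PySem.List.mem_pyRange_one.mp hx
  omega

-- ===== VERDICT (by name: the statement is the Claim_ definition above) =====
theorem print_images_spec : Claim_equal_print_images := by
  intro img1 img2 dic n hdom hpre
  obtain ⟨hn01, -, -, -⟩ := hpre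
  rcases hn01 with hn | hneg
  case _ =>
   lift n to Nat using (by omega : (0 : Int) ≤ n) with n'
   have hn1 : 1 ≤ n' := by exact_mod_cast hn
   unfold Spec_print_images print_images print_images_alt
   dsimp only
   have hcast : ((img1.length : Int) + 1) = ((img1.length + 1 : Nat) : Int) := by push_cast; ring
   rw [hcast, PySem.List.pyRange_zero_natCast, PySem.List.pyRange_zero_natCast,
     List.foldl_map, List.foldl_map]
   have hfun : (fun (x : (List Char × List Char) × (List Char × List Char)) (y : Nat) =>
       (printStep img1 dic (n' : Int) (img1.length : Int) x.1 (y : Int),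
        printStep img2 dic (n' : Int) (img1.length : Int) x.2 (y : Int)))
       = (fun (x : (List Char × List Char) × (List Char × List Char)) (y : Nat) =>
       (pvStep (pvCell img1 dic) img1.length n' x.1 y,
        pvStep (pvCell img2 dic) img1.length n' x.2 y)) := by
     funext x y
     rw [pvStep_cast, pvStep_cast]
   rw [hfun]
   rw [PySem.List.foldl_prod_mk (f := pvStep (pvCell img1 dic) img1.length n')
       (g := pvStep (pvCell img2 dic) img1.length n')]
   rw [PySem.List.foldl_prod_mk
       (f := fun (acc : List (List Char)) (i : Nat) =>
         acc ++ [((PySem.Dict.get? (PySem.Dict.mk dic) ((PySem.List.pyGet? img1 (i : Int)).getD 0)).getD "").toList])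
       (g := fun (acc : List (List Char)) (i : Nat) =>
         acc ++ [((PySem.Dict.get? (PySem.Dict.mk dic) ((PySem.List.pyGet? img2 (i : Int)).getD 0)).getD "").toList])]
   rw [PySem.List.foldl_append_singleton_eq_map, PySem.List.foldl_append_singleton_eq_map]
   dsimp only
   rw [pv_final _ _ _ hn1, pv_final _ _ _ hn1]
   rw [PySem.Int.floordiv_natCast]
   simp only [PySem.List.pyGet?_natCast, List.nil_append]
   rw [pv_alt_rows _ _ _ hn1, pv_alt_rows _ _ _ hn1]
   rfl
  case _ =>
   have hneg' : n ≤ -1 := by omega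
   unfold Spec_print_images print_images print_images_alt
   dsimp only
   have hmod0 : PySem.Int.mod 0 n = 0 := (PySem.Int.mod_eq_zero_iff_dvd 0 n).mpr (dvd_zero n)
   rw [PySem.List.pyRange_one_cons (show (0 : Int) < (img1.length : Int) + 1 by omega)]
   simp only [List.foldl_cons]
   obtain ⟨hA1, hA2⟩ := pv_noflush img1 img2 dic n (img1.length : Int)
       (PySem.List.pyRange (0 + 1) ((img1.length : Int) + 1))
       (fun i hi => by
         have hm := PySem.List.mem_pyRange_one.mp hi
         exact pv_mod_ne_zero n i (by omega) (by omega))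
       (printStep img1 dic n (img1.length : Int) ([], []) 0,
        printStep img2 dic n (img1.length : Int) ([], []) 0)
   rw [hA1, hA2]
   have hs1 : (printStep img1 dic n (img1.length : Int) ([], []) 0).2 = ['\n'] := by
     simp only [printStep, hmod0]
     by_cases h0 : (0 : Int) = (img1.length : Int) <;> simp [h0]
   have hs2 : (printStep img2 dic n (img1.length : Int) ([], []) 0).2 = ['\n'] := by
     simp only [printStep, hmod0]
     by_cases h0 : (0 : Int) = (img1.length : Int) <;> simp [h0]
   rw [hs1, hs2, pv_range_neg_nil img1.length n hneg']
   simp
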